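-- pv_equiv track=rewrite | github.com/thepratholic/Competitive-Programming | CodeChef/Starters 175/Technex_Tickets.py | solve
-- ===== SOURCE A (Python) =====
-- def solve(N):
--     queue = list(range(1, N+10))
--     seconds = 0
--
--     while True:
--         seconds += 1
--
--         first = queue[0]
--         third = queue[2] if len(queue) > 2 else -1
--
--         if first == N or third == N:
--             return seconds
--
--         queue.pop(0)
--         if len(queue) > 1:
--             queue.pop(1)
-- ===== SOURCE B (Python) =====
-- def solve(N):
--     # Closed form: person N meets the front/third check at a fixed second.
--     if N == 1:
--         return 1
--     if N % 2:
--         return (N - 1) // 2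
--     return N // 2 + 1
-- ===== Notes on version B (the rewrite author's own statement) =====
-- stated objective: faster
-- what changed: Replaced the O(N) queue simulation (with O(N) pops from the front, O(N^2) total) by an O(1) closed-form formula derived from the queue's invariant state 2(k-1) :: [2k, 2k+1, ...].
-- outside the precondition, e.g. on solve(-1): A returns 4, B returns -1; on solve(0): A raises IndexError, B returns 1
import Mathlib
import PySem

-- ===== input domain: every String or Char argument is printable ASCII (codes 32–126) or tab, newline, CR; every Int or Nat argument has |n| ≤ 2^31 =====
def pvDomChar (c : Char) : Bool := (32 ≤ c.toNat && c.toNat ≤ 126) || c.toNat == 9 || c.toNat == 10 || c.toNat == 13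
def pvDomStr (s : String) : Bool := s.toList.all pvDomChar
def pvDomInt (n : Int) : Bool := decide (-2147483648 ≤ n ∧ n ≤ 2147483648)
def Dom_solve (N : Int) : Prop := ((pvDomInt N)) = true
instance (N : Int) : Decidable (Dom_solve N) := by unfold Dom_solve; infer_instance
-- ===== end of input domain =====

-- B replaces A's queue simulation by a closed-form formula (asymptotic speed-up).

-- ===== PORT A =====
-- the while-True loop of A: state is (queue, seconds); none = where Python raises IndexError
def solveLoop (N : Int) : List Int → Int → Option Int
  | [], _ => none
  | (a :: rest), sec =>
    let s := sec + 1
    let third : Int := match rest with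
      | _ :: c :: _ => c
      | _ => -1
    if a = N ∨ third = N then some s
    else match rest with
      | b :: _ :: t => solveLoop N (b :: t) s
      | [] => solveLoop N [] s
      | [b] => solveLoop N [b] s
  termination_by q _ => q.length
  decreasing_by all_goals (simp only [List.length_cons, List.length_nil]; omega)

def solve (N : Int) : Int :=
  (solveLoop N (PySem.List.pyRange 1 (N + 10) 1) 0).getD 0

-- ===== PORT B =====
def solve_alt (N : Int) : Int :=
  if N = 1 then 1
  else if PySem.Int.mod N 2 ≠ 0 then PySem.Int.floordiv (N - 1) 2
  else PySem.Int.floordiv N 2 + 1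

-- ===== PRECONDITION & SPEC =====
-- Pre_ excludes N ≤ 0, where the queue 1..N+9 never contains N: A then empties the queue and
-- raises IndexError, except at N = -1 where A's '-1' sentinel for a missing third element
-- accidentally matches the input and A returns 4, an artefact of the sentinel choice.
def Pre_solve (N : Int) : Prop := 1 ≤ N
instance (N : Int) : Decidable (Pre_solve N) := by unfold Pre_solve; infer_instance
def pvWitness_solve : Int := 7

def Spec_solve (N : Int) (out : Int) : Prop := out = solve_alt N
instance (N : Int) (out : Int) : Decidable (Spec_solve N out) := by unfold Spec_solve; infer_instance

-- ===== CLAIM (what is proved, stated in full; the proofs are below) =====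
def Claim_equal_solve : Prop := ∀ (N : Int), Dom_solve N → Pre_solve N → Spec_solve N (solve N)

-- ===== LEMMAS AND PROOFS =====

-- one iteration of the loop, in the three shapes the proof meets
lemma solveLoop_ret_first (N a b c sec : Int) (t : List Int) (h : a = N) :
    solveLoop N (a :: b :: c :: t) sec = some (sec + 1) := by
  simp [solveLoop, h]

lemma solveLoop_ret_third (N a b c sec : Int) (t : List Int) (h : c = N) :
    solveLoop N (a :: b :: c :: t) sec = some (sec + 1) := by
  simp [solveLoop, h]

lemma solveLoop_step (N a b c sec : Int) (t : List Int) (h1 : a ≠ N) (h2 : c ≠ N) :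
    solveLoop N (a :: b :: c :: t) sec = solveLoop N (b :: t) (sec + 1) := by
  simp [solveLoop, h1, h2]

-- the target second in plain Int arithmetic (proof-side mirror of solve_alt)
def Tgt (N : Int) : Int := if N % 2 = 0 then N / 2 + 1 else (N - 1) / 2

lemma solve_alt_eq_Tgt (N : Int) (h : 2 ≤ N) : solve_alt N = Tgt N := by
  have h2 : (0:Int) < 2 := by norm_num
  simp only [solve_alt, Tgt, PySem.Int.mod_eq_emod_of_pos h2,
    PySem.Int.floordiv_eq_ediv_of_pos h2]
  have hne : N ≠ 1 := by omega
  rcases Int.emod_two_eq_zero_or_one N with hp | hp <;> simp [hne, hp]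

-- loop invariant: at second k (2 ≤ k ≤ Tgt N) the queue is 2k-2 :: [2k, 2k+1, ..., N+9]
lemma loop_inv (N : Int) :
    ∀ (j : Nat) (k : Int), 2 ≤ k → k + j = Tgt N →
      solveLoop N ((2 * k - 2) :: PySem.List.pyRange (2 * k) (N + 10) 1) (k - 1)
        = some (Tgt N) := by
  intro j
  induction j with
  | zero =>
    intro k hk hkT
    have hkT' : k = Tgt N := by omega
    have hT : Tgt N = if N % 2 = 0 then N / 2 + 1 else (N - 1) / 2 := rfl
    rcases Int.emod_two_eq_zero_or_one N with hp | hp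
    · -- even N: first = 2k-2 = N
      have hfirst : 2 * k - 2 = N := by rw [hkT', hT, if_pos hp]; omega
      rw [PySem.List.pyRange_one_cons (by omega : 2 * k < N + 10),
          PySem.List.pyRange_one_cons (by omega : 2 * k + 1 < N + 10)]
      rw [solveLoop_ret_first N _ _ _ _ _ hfirst]
      simp only [Option.some.injEq]; omega
    · -- odd N: third = 2k+1 = N
      have h2k : 2 * k = N - 1 := by rw [hkT', hT, if_neg (by omega)]; omega
      rw [PySem.List.pyRange_one_cons (by omega : 2 * k < N + 10),
          PySem.List.pyRange_one_cons (by omega : 2 * k + 1 < N + 10)]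
      rw [solveLoop_ret_third N _ _ _ _ _ (by omega : 2 * k + 1 = N)]
      simp only [Option.some.injEq]; omega
  | succ j ih =>
    intro k hk hkT
    have hT : Tgt N = if N % 2 = 0 then N / 2 + 1 else (N - 1) / 2 := rfl
    have hkT2 : k < Tgt N := by omega
    have hpar := Int.emod_two_eq_zero_or_one N
    rw [hT] at hkT2
    have hfirst : 2 * k - 2 ≠ N := by
      rcases hpar with hp | hp <;> simp [hp] at hkT2 <;> omega
    have hthird : 2 * k + 1 ≠ N := by
      rcases hpar with hp | hp <;> simp [hp] at hkT2 <;> omega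
    have hc1 : 2 * k < N + 10 := by
      rcases hpar with hp | hp <;> simp [hp] at hkT2 <;> omega
    rw [PySem.List.pyRange_one_cons hc1,
        PySem.List.pyRange_one_cons (by omega : 2 * k + 1 < N + 10)]
    rw [solveLoop_step N _ _ _ _ _ hfirst hthird]
    have hrec := ih (k + 1) (by omega) (by push_cast at hkT ⊢; omega)
    have e1 : 2 * (k + 1) - 2 = 2 * k := by ring
    have e2 : 2 * (k + 1) = 2 * k + 1 + 1 := by ring
    have e3 : k + 1 - 1 = k - 1 + 1 := by ring
    rw [e1, e2, e3] at hrec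
    exact hrec

-- ===== VERDICT (by name: the statement is the Claim_ definition above) =====
theorem solve_spec : Claim_equal_solve := by
  intro N _ hPre
  unfold Spec_solve solve
  have hPre : (1:Int) ≤ N := hPre
  have hexp : PySem.List.pyRange 1 (N + 10) 1 = 1 :: 2 :: 3 :: PySem.List.pyRange 4 (N + 10) 1 := by
    rw [PySem.List.pyRange_one_cons (by omega : (1:Int) < N + 10)]; norm_num
    rw [PySem.List.pyRange_one_cons (by omega : (2:Int) < N + 10)]; norm_num
    rw [PySem.List.pyRange_one_cons (by omega : (3:Int) < N + 10)]; norm_num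
  rw [hexp]
  by_cases hN1 : N = 1
  · subst hN1; simp [solveLoop, solve_alt]
  by_cases hN3 : N = 3
  · subst hN3
    simp [solveLoop]
    decide
  · have hN2 : 2 ≤ N := by omega
    rw [solveLoop_step N _ _ _ _ _ (by omega) (by omega)]
    norm_num
    have hT2 : 2 ≤ Tgt N := by
      have hT : Tgt N = if N % 2 = 0 then N / 2 + 1 else (N - 1) / 2 := rfl
      rcases Int.emod_two_eq_zero_or_one N with hp | hp <;> rw [hT] <;> simp [hp] <;> omega
    have hj := loop_inv N (Tgt N - 2).toNat 2 (by omega) (by omega)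
    norm_num at hj
    rw [hj]
    simp [solve_alt_eq_Tgt N hN2]
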